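-- pv_equiv track=rewrite | github.com/nbi-hyq/FusionGraphTransformer | test/unit_tests.py | identical_edges
-- ===== SOURCE A (Python) =====
-- def identical_edges(set1, set2):
--     for e in set1.difference(set2):
--         if not (e[1], e[0]) in set2:
--             return False
--     for e in set2.difference(set1):
--         if not (e[1], e[0]) in set1:
--             return False
--     return True
-- ===== SOURCE B (Python) =====
-- def identical_edges(set1, set2):
--     return {frozenset(e) for e in set1} == {frozenset(e) for e in set2}
-- ===== Notes on version B (the rewrite author's own statement) =====
-- stated objective: simpler
-- what changed: Replaces A's two set-difference loops with reversed-membership lookups by one normalization pass per set (orientation-independent frozenset keys) and a single set-equality comparison.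
import Mathlib
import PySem

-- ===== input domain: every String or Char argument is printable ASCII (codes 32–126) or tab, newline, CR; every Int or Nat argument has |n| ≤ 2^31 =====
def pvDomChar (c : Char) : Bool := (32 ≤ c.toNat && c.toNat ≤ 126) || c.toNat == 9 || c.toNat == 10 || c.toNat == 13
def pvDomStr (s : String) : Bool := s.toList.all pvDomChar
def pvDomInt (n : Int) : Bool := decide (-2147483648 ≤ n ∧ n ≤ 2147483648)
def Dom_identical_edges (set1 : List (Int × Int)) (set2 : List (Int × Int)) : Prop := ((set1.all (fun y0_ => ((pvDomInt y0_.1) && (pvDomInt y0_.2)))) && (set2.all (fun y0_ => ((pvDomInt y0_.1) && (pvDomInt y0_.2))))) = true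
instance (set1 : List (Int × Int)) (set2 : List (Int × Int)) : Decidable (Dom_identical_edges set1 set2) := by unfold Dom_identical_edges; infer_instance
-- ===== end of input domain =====

-- B replaces A's two difference loops with per-edge canonical keys and one set-equality test.
-- ===== PORT A =====
-- first/second 'for' loop of A: early-return False on a missing reversed edge
def pvLoopA (diff : List (Int × Int)) (other : List (Int × Int)) : Bool :=
  match diff with
  | [] => true
  | e :: rest => if ¬ other.contains (e.2, e.1) then false else pvLoopA rest other

def identical_edges (set1 : List (Int × Int)) (set2 : List (Int × Int)) : Bool :=
  if pvLoopA (set1.filter (fun e => ¬ set2.contains e)) set2 then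
    pvLoopA (set2.filter (fun e => ¬ set1.contains e)) set1
  else false

-- ===== PORT B =====
-- frozenset key of an edge: the endpoints in nondecreasing order (exact for Int endpoints)
def pvNorm (e : Int × Int) : Int × Int := if e.1 ≤ e.2 then e else (e.2, e.1)

-- set equality of the two normalized edge sets (mutual containment)
def identical_edges_alt (set1 : List (Int × Int)) (set2 : List (Int × Int)) : Bool :=
  let n1 := set1.map pvNorm
  let n2 := set2.map pvNorm
  n1.all (fun x => n2.contains x) && n2.all (fun x => n1.contains x)

-- ===== PRECONDITION & SPEC =====
def Spec_identical_edges (set1 : List (Int × Int)) (set2 : List (Int × Int)) (out : Bool) : Prop := out = identical_edges_alt set1 set2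
instance (set1 : List (Int × Int)) (set2 : List (Int × Int)) (out : Bool) : Decidable (Spec_identical_edges set1 set2 out) := by unfold Spec_identical_edges; infer_instance

-- ===== CLAIM (what is proved, stated in full; the proofs are below) =====
def Claim_equal_identical_edges : Prop := ∀ (set1 : List (Int × Int)) (set2 : List (Int × Int)), Dom_identical_edges set1 set2 → Spec_identical_edges set1 set2 (identical_edges set1 set2)

-- ===== LEMMAS AND PROOFS =====

lemma pvLoopA_eq_all (diff other : List (Int × Int)) :
    pvLoopA diff other = diff.all (fun e => other.contains (e.2, e.1)) := by
  induction diff with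
  | nil => rfl
  | cons e rest ih =>
    simp only [pvLoopA, List.all_cons, ih]
    by_cases h : other.contains (e.2, e.1) <;> simp [h]

lemma pvNorm_rev (e : Int × Int) : pvNorm (e.2, e.1) = pvNorm e := by
  rcases e with ⟨a, b⟩
  simp only [pvNorm]
  split_ifs <;> (first | rfl | (exact congrArg₂ Prod.mk (by omega) (by omega)))

lemma pvNorm_eq_cases {f e : Int × Int} (h : pvNorm f = pvNorm e) :
    f = e ∨ f = (e.2, e.1) := by
  rcases f with ⟨a, b⟩; rcases e with ⟨c, d⟩
  simp only [pvNorm] at h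
  split_ifs at h <;> simp_all [Prod.ext_iff] <;> omega

lemma pvNorm_mem_map {e : Int × Int} {s : List (Int × Int)} :
    (s.map pvNorm).contains (pvNorm e) = true ↔ e ∈ s ∨ (e.2, e.1) ∈ s := by
  simp only [List.contains_eq_mem, decide_eq_true_eq, List.mem_map]
  constructor
  · rintro ⟨f, hf, hfe⟩
    rcases pvNorm_eq_cases hfe with h | h
    · exact Or.inl (h ▸ hf)
    · right
      have : f = ((e.2, e.1).1, (e.2, e.1).2) := h
      simpa [← this] using hf
  · rintro (h | h)
    · exact ⟨e, h, rfl⟩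
    · exact ⟨(e.2, e.1), h, pvNorm_rev e⟩

lemma side_eq (s t : List (Int × Int)) :
    (s.filter (fun e => ¬ t.contains e)).all (fun e => t.contains (e.2, e.1))
      = (s.map pvNorm).all (fun x => (t.map pvNorm).contains x) := by
  rw [List.all_map]
  rw [Bool.eq_iff_iff]
  simp only [List.all_eq_true, List.mem_filter, Function.comp]
  constructor
  · intro h e he
    rw [pvNorm_mem_map]
    by_cases hmem : t.contains e = true
    · exact Or.inl (by simpa using hmem)
    · exact Or.inr (by simpa using h e ⟨he, by simpa using hmem⟩)
  · intro h e he
    have := (pvNorm_mem_map).1 (h e he.1)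
    rcases this with hm | hm
    · exact absurd (by simpa using hm : t.contains e = true) (by simpa using he.2)
    · simpa using hm

-- ===== VERDICT (by name: the statement is the Claim_ definition above) =====
theorem identical_edges_spec : Claim_equal_identical_edges := by
  intro set1 set2 _
  unfold Spec_identical_edges identical_edges identical_edges_alt
  rw [pvLoopA_eq_all, pvLoopA_eq_all, side_eq, side_eq]
  by_cases h : (set1.map pvNorm).all (fun x => (set2.map pvNorm).contains x) = true <;>
    simp [h]
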